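-- pv_equiv track=rewrite | github.com/DenisGazizov/algo | YP_6/62D_best_vacation.py | func
-- ===== SOURCE A (Python) =====
-- def func(n, k, array):
--     array.sort()
--     max_window = 0
--     left, right = 0, 1
--     while left < n:
--         while right < n:
--             if array[right] - array[left] <= k:
--                 right += 1
--             else:
--                 break
--         if (right - left) > max_window:
--             max_window = (right - left)
--         left += 1
--
--     return max_window
-- ===== SOURCE B (Python) =====
-- def func(n, k, array):
--     array.sort()
--     max_window = 0
--     for left in range(n):
--         # the window starting at left always contains array[left]; binary-search
--         # the first index in [left+1, n) whose value exceeds array[left] + k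
--         target = array[left] + k
--         lo, hi = left + 1, n
--         while lo < hi:
--             mid = (lo + hi) // 2
--             if array[mid] <= target:
--                 lo = mid + 1
--             else:
--                 hi = mid
--         if lo - left > max_window:
--             max_window = lo - left
--     return max_window
-- ===== Notes on version B (the rewrite author's own statement) =====
-- stated objective: alternative
-- what changed: Replaces A's single carried monotone two-pointer sweep (inner while advancing a shared right cursor) by an independent hand-written binary search (bisect_right over [left+1, n)) for each left endpoint, a differently shaped scan over the sorted array.
-- outside the precondition, e.g. on func(1, 0, []): A returns 1, B raises IndexError
import Mathlib
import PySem

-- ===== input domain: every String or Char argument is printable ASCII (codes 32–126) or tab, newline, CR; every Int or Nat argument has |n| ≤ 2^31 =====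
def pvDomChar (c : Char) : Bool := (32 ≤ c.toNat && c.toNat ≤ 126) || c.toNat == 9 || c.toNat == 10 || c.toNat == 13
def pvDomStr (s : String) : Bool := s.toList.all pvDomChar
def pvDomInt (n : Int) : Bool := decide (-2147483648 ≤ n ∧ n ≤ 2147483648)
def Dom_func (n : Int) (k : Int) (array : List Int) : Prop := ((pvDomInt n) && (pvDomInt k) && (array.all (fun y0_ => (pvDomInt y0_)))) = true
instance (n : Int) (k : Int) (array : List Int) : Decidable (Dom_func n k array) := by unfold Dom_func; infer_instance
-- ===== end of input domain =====

-- B replaces A's carried two-pointer sweep by an independent binary search per left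
-- endpoint (alternative decomposition); equivalence is about the RETURN value only —
-- both Pythons sort `array` in place, an observable mutation.


-- ===== PORT A =====
-- inner `while right < n` loop of A
def funcInner (a : List Int) (n k left right : Int) : Int :=
  if _h : right < n then
    if PySem.List.pyGetD a right 0 - PySem.List.pyGetD a left 0 ≤ k then
      funcInner a n k left (right + 1)
    else right
  else right
termination_by (n - right).toNat
decreasing_by omega

-- outer `while left < n` loop of A (state: left, right, max_window)
def funcOuter (a : List Int) (n k left right maxw : Int) : Int :=
  if _h : left < n then
    let r := funcInner a n k left right
    funcOuter a n k (left + 1) r (if r - left > maxw then r - left else maxw)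
  else maxw
termination_by (n - left).toNat
decreasing_by omega

def func (n : Int) (k : Int) (array : List Int) : Int :=
  funcOuter (PySem.List.sorted array (fun x => x) false) n k 0 1 0

-- ===== PORT B =====
-- hand-written `while lo < hi` binary search of Source B (A imports no modules, so Source B
-- hand-rolls bisect_right on [lo, hi))
def bAltSearch (a : List Int) (t lo hi : Int) : Int :=
  if _h : lo < hi then
    let mid := PySem.Int.floordiv (lo + hi) 2
    if PySem.List.pyGetD a mid 0 ≤ t then bAltSearch a t (mid + 1) hi
    else bAltSearch a t lo mid
  else lo
termination_by (hi - lo).toNat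
decreasing_by
  all_goals
    have h2 := PySem.Int.floordiv_two_mid_bounds (lo := lo) (hi := hi) (by omega)
    have h3 : PySem.Int.floordiv (lo + hi) 2 < hi :=
      (PySem.Int.floordiv_lt_iff_lt_mul (by omega)).mpr (by omega)
    omega

-- `for left in range(n)` loop of Source B (state: left, max_window)
def funcAltLoop (a : List Int) (n k left maxw : Int) : Int :=
  if _h : left < n then
    let t := PySem.List.pyGetD a left 0 + k
    let r := bAltSearch a t (left + 1) n
    funcAltLoop a n k (left + 1) (if r - left > maxw then r - left else maxw)
  else maxw
termination_by (n - left).toNat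
decreasing_by omega

def func_alt (n : Int) (k : Int) (array : List Int) : Int :=
  funcAltLoop (PySem.List.sorted array (fun x => x) false) n k 0 0

-- ===== PRECONDITION & SPEC =====
-- Pre_ excludes n > len(array): there A raises IndexError (except the degenerate n = 1
-- with an empty array, where A happens to index nothing and returns 1 while B raises).
def Pre_func (n : Int) (k : Int) (array : List Int) : Prop := n ≤ (array.length : Int)
instance (n : Int) (k : Int) (array : List Int) : Decidable (Pre_func n k array) := by unfold Pre_func; infer_instance
def pvWitness_func : Int × Int × List Int := (3, 1, [4, 0, 2])

def Spec_func (n : Int) (k : Int) (array : List Int) (out : Int) : Prop := out = func_alt n k array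
instance (n : Int) (k : Int) (array : List Int) (out : Int) : Decidable (Spec_func n k array out) := by unfold Spec_func; infer_instance

-- ===== CLAIM (what is proved, stated in full; the proofs are below) =====
def Claim_equal_func : Prop := ∀ (n : Int) (k : Int) (array : List Int), Dom_func n k array → Pre_func n k array → Spec_func n k array (func n k array)

-- ===== LEMMAS AND PROOFS =====

-- abbreviation used throughout the proofs
def pvG (a : List Int) (i : Int) : Int := PySem.List.pyGetD a i 0

-- monotone prefix: the sorted list is nondecreasing under pvG
def pvMono (a : List Int) : Prop :=
  ∀ i j : Int, 0 ≤ i → i ≤ j → j < (a.length : Int) → pvG a i ≤ pvG a j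

lemma pvMono_sorted (xs : List Int) : pvMono (PySem.List.sorted xs (fun x => x) false) := by
  intro i j h0 hij hj
  unfold pvG
  rw [PySem.List.pyGetD_eq_getElem _ _ (by omega) (by omega),
      PySem.List.pyGetD_eq_getElem _ _ (by omega) (by omega)]
  exact PySem.List.sorted_id_getElem_mono xs (by omega) (by omega)

-- the "first index whose value exceeds t" characterisation shared by both loops
def pvFound (a : List Int) (n t r : Int) : Prop :=
  0 ≤ r ∧ r ≤ n ∧ (∀ j, 0 ≤ j → j < r → pvG a j ≤ t) ∧ (∀ j, r ≤ j → j < n → t < pvG a j)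

lemma pvFound_unique {a : List Int} {n t r1 r2 : Int}
    (h1 : pvFound a n t r1) (h2 : pvFound a n t r2) : r1 = r2 := by
  obtain ⟨h10, h1n, h1le, h1gt⟩ := h1
  obtain ⟨h20, h2n, h2le, h2gt⟩ := h2
  by_contra hne
  rcases lt_or_gt_of_ne hne with h | h
  · exact absurd (h2le r1 h10 h) (not_le.mpr (h1gt r1 le_rfl (by omega)))
  · exact absurd (h1le r2 h20 h) (not_le.mpr (h2gt r2 le_rfl (by omega)))

lemma funcInner_found {a : List Int} {n k left : Int}
    (hm : pvMono a) (hlen : n ≤ (a.length : Int)) (hl : 0 ≤ left) :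
    ∀ right, 0 ≤ right → right ≤ n →
      (∀ j, 0 ≤ j → j < right → pvG a j ≤ pvG a left + k) →
      pvFound a n (pvG a left + k) (funcInner a n k left right) := by
  suffices H : ∀ M : ℕ, ∀ right, (n - right).toNat = M → 0 ≤ right → right ≤ n →
      (∀ j, 0 ≤ j → j < right → pvG a j ≤ pvG a left + k) →
      pvFound a n (pvG a left + k) (funcInner a n k left right) from
    fun right h0 hn inv => H _ right rfl h0 hn inv
  intro M
  induction M using Nat.strong_induction_on with
  | _ M ih =>
    intro right hM h0 hn inv
    rw [funcInner]
    split_ifs with h1 h2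
    · -- advance
      exact ih (n - (right + 1)).toNat (by omega) (right + 1) rfl (by omega) (by omega)
        (fun j hj0 hj1 => by
          rcases (by omega : j < right ∨ j = right) with h | h
          · exact inv j hj0 h
          · subst h; unfold pvG at *; omega)
    · -- stop: array[right] - array[left] > k
      refine ⟨h0, by omega, inv, fun j hj1 hj2 => ?_⟩
      have := hm right j h0 hj1 (by omega)
      unfold pvG at *; omega
    · -- right = n
      have : right = n := by omega
      subst this
      exact ⟨h0, le_rfl, inv, fun j hj1 hj2 => by omega⟩

lemma bAltSearch_found {a : List Int} {n t : Int}
    (hm : pvMono a) (hlen : n ≤ (a.length : Int)) :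
    ∀ lo hi, 0 ≤ lo → lo ≤ hi → hi ≤ n →
      (∀ j, 0 ≤ j → j < lo → pvG a j ≤ t) →
      (∀ j, hi ≤ j → j < n → t < pvG a j) →
      lo ≤ bAltSearch a t lo hi ∧ pvFound a n t (bAltSearch a t lo hi) := by
  suffices H : ∀ M : ℕ, ∀ lo hi, (hi - lo).toNat = M → 0 ≤ lo → lo ≤ hi → hi ≤ n →
      (∀ j, 0 ≤ j → j < lo → pvG a j ≤ t) →
      (∀ j, hi ≤ j → j < n → t < pvG a j) →
      lo ≤ bAltSearch a t lo hi ∧ pvFound a n t (bAltSearch a t lo hi) from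
    fun lo hi h0 h1 h2 h3 h4 => H _ lo hi rfl h0 h1 h2 h3 h4
  intro M
  induction M using Nat.strong_induction_on with
  | _ M ih =>
    intro lo hi hM h0 hlohi hhin ilo ihi
    have hmid := PySem.Int.floordiv_two_mid_bounds (lo := lo) (hi := hi) (by omega)
    rw [bAltSearch]
    simp only []
    split_ifs with h1 h2
    · -- array[mid] <= t : search right half
      have hmlt : PySem.Int.floordiv (lo + hi) 2 < hi :=
        (PySem.Int.floordiv_lt_iff_lt_mul (by omega)).mpr (by omega)
      have hrec := ih (hi - (PySem.Int.floordiv (lo + hi) 2 + 1)).toNat (by omega)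
        (PySem.Int.floordiv (lo + hi) 2 + 1) hi rfl (by omega) (by omega) hhin
        (fun j hj0 hj1 => by
          have := hm j (PySem.Int.floordiv (lo + hi) 2) hj0 (by omega) (by omega)
          unfold pvG at *; omega)
        ihi
      exact ⟨by omega, hrec.2⟩
    · -- t < array[mid] : search left half
      have hmlt : PySem.Int.floordiv (lo + hi) 2 < hi :=
        (PySem.Int.floordiv_lt_iff_lt_mul (by omega)).mpr (by omega)
      exact ih (PySem.Int.floordiv (lo + hi) 2 - lo).toNat (by omega) lo
        (PySem.Int.floordiv (lo + hi) 2) rfl h0 (by omega) (by omega) ilo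
        (fun j hj1 hj2 => by
          have := hm (PySem.Int.floordiv (lo + hi) 2) j (by omega) hj1 (by omega)
          unfold pvG at *; omega)
    · -- lo = hi
      have : lo = hi := by omega
      subst this
      exact ⟨le_rfl, h0, by omega, ilo, fun j hj1 hj2 => ihi j hj1 hj2⟩

-- k ≥ 0 : the two loops compute the same r at every left
lemma pvMain_nonneg {a : List Int} {n k : Int}
    (hm : pvMono a) (hlen : n ≤ (a.length : Int)) (hk : 0 ≤ k) :
    ∀ left right maxw, 0 ≤ left →
      (left < n → 0 ≤ right ∧ right ≤ n ∧
        (∀ j, 0 ≤ j → j < right → pvG a j ≤ pvG a left + k)) →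
      funcOuter a n k left right maxw = funcAltLoop a n k left maxw := by
  suffices H : ∀ M : ℕ, ∀ left right maxw, (n - left).toNat = M → 0 ≤ left →
      (left < n → 0 ≤ right ∧ right ≤ n ∧
        (∀ j, 0 ≤ j → j < right → pvG a j ≤ pvG a left + k)) →
      funcOuter a n k left right maxw = funcAltLoop a n k left maxw from
    fun left right maxw h0 hg => H _ left right maxw rfl h0 hg
  intro M
  induction M using Nat.strong_induction_on with
  | _ M ih =>
    intro left right maxw hM h0 hg
    rw [funcOuter, funcAltLoop]
    by_cases hln : left < n
    · rw [dif_pos hln, dif_pos hln]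
      simp only []
      obtain ⟨hr0, hrn, inv⟩ := hg hln
      have hA := funcInner_found hm hlen h0 right hr0 hrn inv
      have hB := bAltSearch_found (t := PySem.List.pyGetD a left 0 + k) hm hlen
        (left + 1) n (by omega) (by omega) le_rfl
        (fun j hj0 hj1 => by
          have := hm j left hj0 (by omega) (by omega)
          unfold pvG at *; omega)
        (fun j hj1 hj2 => by omega)
      have hEq : funcInner a n k left right =
          bAltSearch a (PySem.List.pyGetD a left 0 + k) (left + 1) n :=
        pvFound_unique hA hB.2
      rw [hEq]
      exact ih (n - (left + 1)).toNat (by omega) (left + 1) _ _ rfl (by omega)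
        (fun hln1 => by
          obtain ⟨hb0, hbn, hble, _⟩ := hB.2
          refine ⟨hb0, hbn, fun j hj0 hj1 => ?_⟩
          have h1 := hble j hj0 hj1
          have h2 := hm left (left + 1) h0 (by omega) (by omega)
          unfold pvG at *; omega)
    · rw [dif_neg hln, dif_neg hln]

-- k < 0 : A's inner pointer never passes left
lemma funcInner_neg {a : List Int} {n k left : Int} (hk : k < 0)
    (hm : pvMono a) (hlen : n ≤ (a.length : Int)) (hl : 0 ≤ left) (hln : left < n) :
    ∀ right, 0 ≤ right → right ≤ left → funcInner a n k left right ≤ left := by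
  suffices H : ∀ M : ℕ, ∀ right, (n - right).toNat = M → 0 ≤ right → right ≤ left →
      funcInner a n k left right ≤ left from fun right h0 h1 => H _ right rfl h0 h1
  intro M
  induction M using Nat.strong_induction_on with
  | _ M ih =>
    intro right hM h0 hrl
    rw [funcInner]
    split_ifs with h1 h2
    · refine ih (n - (right + 1)).toNat (by omega) (right + 1) rfl (by omega) ?_
      by_contra hcon
      have hre : right = left := by omega
      subst hre
      omega
    · exact hrl
    · exact hrl

-- A's inner pointer never moves backwards
lemma funcInner_ge (a : List Int) (n k left : Int) :
    ∀ right, right ≤ funcInner a n k left right := by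
  suffices H : ∀ M : ℕ, ∀ right, (n - right).toNat = M →
      right ≤ funcInner a n k left right from fun right => H _ right rfl
  intro M
  induction M using Nat.strong_induction_on with
  | _ M ih =>
    intro right hM
    rw [funcInner]
    split_ifs with h1 h2
    · have := ih (n - (right + 1)).toNat (by omega) (right + 1) rfl
      omega
    · exact le_rfl
    · exact le_rfl

lemma funcOuter_neg {a : List Int} {n k : Int} (hk : k < 0)
    (hm : pvMono a) (hlen : n ≤ (a.length : Int)) :
    ∀ left right maxw, 1 ≤ left → 0 ≤ right → right ≤ left → 0 ≤ maxw →
      funcOuter a n k left right maxw = maxw := by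
  suffices H : ∀ M : ℕ, ∀ left right maxw, (n - left).toNat = M → 1 ≤ left → 0 ≤ right →
      right ≤ left → 0 ≤ maxw → funcOuter a n k left right maxw = maxw from
    fun left right maxw h1 h2 h3 h4 => H _ left right maxw rfl h1 h2 h3 h4
  intro M
  induction M using Nat.strong_induction_on with
  | _ M ih =>
    intro left right maxw hM h1 h2 h3 h4
    rw [funcOuter]
    by_cases hln : left < n
    · rw [dif_pos hln]
      simp only []
      have hr := funcInner_neg hk hm hlen (by omega) hln right h2 h3
      have hr2 := funcInner_ge a n k left right
      rw [if_neg (by omega)]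
      exact ih (n - (left + 1)).toNat (by omega) (left + 1) _ maxw rfl (by omega)
        (by omega) (by omega) h4
    · rw [dif_neg hln]

-- k < 0 : B's binary search over an all-greater range returns lo
lemma bAltSearch_all_gt {a : List Int} {t : Int} :
    ∀ lo hi, (∀ j, lo ≤ j → j < hi → t < pvG a j) → bAltSearch a t lo hi = lo := by
  suffices H : ∀ M : ℕ, ∀ lo hi, (hi - lo).toNat = M →
      (∀ j, lo ≤ j → j < hi → t < pvG a j) → bAltSearch a t lo hi = lo from
    fun lo hi h => H _ lo hi rfl h
  intro M
  induction M using Nat.strong_induction_on with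
  | _ M ih =>
    intro lo hi hM hgt
    rw [bAltSearch]
    simp only []
    split_ifs with h1 h2
    · exfalso
      have hmid := PySem.Int.floordiv_two_mid_bounds (lo := lo) (hi := hi) (by omega)
      have hmlt : PySem.Int.floordiv (lo + hi) 2 < hi :=
        (PySem.Int.floordiv_lt_iff_lt_mul (by omega)).mpr (by omega)
      have := hgt (PySem.Int.floordiv (lo + hi) 2) (by omega) (by omega)
      unfold pvG at *; omega
    · have hmid := PySem.Int.floordiv_two_mid_bounds (lo := lo) (hi := hi) (by omega)
      have hmlt : PySem.Int.floordiv (lo + hi) 2 < hi :=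
        (PySem.Int.floordiv_lt_iff_lt_mul (by omega)).mpr (by omega)
      exact ih (PySem.Int.floordiv (lo + hi) 2 - lo).toNat (by omega) lo
        (PySem.Int.floordiv (lo + hi) 2) rfl
        (fun j hj1 hj2 => hgt j hj1 (by omega))
    · rfl

lemma funcAltLoop_neg {a : List Int} {n k : Int} (hk : k < 0)
    (hm : pvMono a) (hlen : n ≤ (a.length : Int)) :
    ∀ left maxw, 0 ≤ left →
      funcAltLoop a n k left maxw = if left < n then (if maxw < 1 then 1 else maxw) else maxw := by
  suffices H : ∀ M : ℕ, ∀ left maxw, (n - left).toNat = M → 0 ≤ left →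
      funcAltLoop a n k left maxw = if left < n then (if maxw < 1 then 1 else maxw) else maxw from
    fun left maxw h0 => H _ left maxw rfl h0
  intro M
  induction M using Nat.strong_induction_on with
  | _ M ih =>
    intro left maxw hM h0
    rw [funcAltLoop]
    by_cases hln : left < n
    · rw [dif_pos hln]
      simp only []
      have hr : bAltSearch a (PySem.List.pyGetD a left 0 + k) (left + 1) n = left + 1 := by
        apply bAltSearch_all_gt (left + 1) n
        intro j hj1 hj2
        have := hm left j h0 (by omega) (by omega)
        unfold pvG at *; omega
      rw [hr]
      rw [ih (n - (left + 1)).toNat (by omega) (left + 1) _ rfl (by omega)]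
      rw [if_pos hln]
      split_ifs <;> omega
    · rw [dif_neg hln, if_neg hln]

-- ===== VERDICT (by name: the statement is the Claim_ definition above) =====
theorem func_spec : Claim_equal_func := by
  intro n k array _hdom hpre
  unfold Spec_func func func_alt
  set a := PySem.List.sorted array (fun x => x) false with ha
  have hm : pvMono a := pvMono_sorted array
  have hlen : n ≤ (a.length : Int) := by
    rw [ha, PySem.List.length_sorted]; exact hpre
  rcases (by omega : 0 ≤ k ∨ k < 0) with hk | hk
  · exact pvMain_nonneg hm hlen hk 0 1 0 le_rfl (fun h0 => ⟨by omega, by omega,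
      fun j hj0 hj1 => by
        have : j = 0 := by omega
        subst this; unfold pvG; omega⟩)
  · rw [funcAltLoop_neg hk hm hlen 0 0 le_rfl]
    rw [funcOuter]
    by_cases hn : 0 < n
    · rw [dif_pos hn]
      simp only []
      have hr : funcInner a n k 0 1 = 1 := by
        rw [funcInner]
        split_ifs with h1 h2
        · exfalso
          have := hm 0 1 le_rfl (by omega) (by omega)
          unfold pvG at this; omega
        · rfl
        · rfl
      rw [hr]
      norm_num
      rw [funcOuter_neg hk hm hlen 1 1 1 (by omega) (by omega) (by omega) (by omega)]
      rw [if_pos hn]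
    · rw [dif_neg hn, if_neg hn]
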